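-- pv_equiv track=rewrite | github.com/pypi-data/pypi-mirror-398 | packages/ares-reasoning/ares_reasoning-1.0.0-py3-none-any.whl/ares/verifier.py | _has_self_doubt
-- ===== SOURCE A (Python) =====
-- def _has_self_doubt(reasoning: str) -> bool:
--     """Detect if LLM expressed doubt about its own reasoning."""
--     doubt_phrases = [
--         "doesn't make sense",
--         "does not make sense",
--         "this is incorrect",
--         "this can't be right",
--         "impossible",
--         "let me reconsider",
--         "wait, that's wrong"
--     ]
--     reasoning_lower = reasoning.lower()
--     return any(phrase in reasoning_lower for phrase in doubt_phrases)
-- ===== SOURCE B (Python) =====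
-- _DOUBT_PHRASES = [
--     "doesn't make sense",
--     "does not make sense",
--     "this is incorrect",
--     "this can't be right",
--     "impossible",
--     "let me reconsider",
--     "wait, that's wrong",
-- ]
--
-- # index phrases by first character, built once
-- _BY_FIRST = {}
-- for _p in _DOUBT_PHRASES:
--     _BY_FIRST.setdefault(_p[0], []).append(_p)
--
--
-- def _has_self_doubt(reasoning: str) -> bool:
--     """Detect if LLM expressed doubt about its own reasoning."""
--     text = reasoning.lower()
--     for i, ch in enumerate(text):
--         for phrase in _BY_FIRST.get(ch, ()):
--             if text.startswith(phrase, i):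
--                 return True
--     return False
-- ===== Notes on version B (the rewrite author's own statement) =====
-- stated objective: alternative
-- what changed: Replaces seven independent full-text substring scans (one per phrase) by a single left-to-right scan over the lowered text with a first-character dictionary index, so at each position only the phrases starting with the current character are tested as prefixes.
import Mathlib
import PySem

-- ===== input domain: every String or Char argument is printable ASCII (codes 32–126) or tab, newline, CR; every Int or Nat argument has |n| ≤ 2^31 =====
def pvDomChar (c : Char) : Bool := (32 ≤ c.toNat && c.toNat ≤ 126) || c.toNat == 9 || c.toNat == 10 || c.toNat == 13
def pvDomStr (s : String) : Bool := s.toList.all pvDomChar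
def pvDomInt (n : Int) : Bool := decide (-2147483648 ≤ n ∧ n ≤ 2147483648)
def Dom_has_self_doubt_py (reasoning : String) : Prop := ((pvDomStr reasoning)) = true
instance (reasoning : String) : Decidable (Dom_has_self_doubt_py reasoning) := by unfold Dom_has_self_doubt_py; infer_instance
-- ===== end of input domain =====

-- B replaces A's seven independent substring scans by one left-to-right scan over the
-- lowered text with a first-character dictionary index (objective: alternative).

-- ===== PORT A =====
def doubtPhrasesA : List String :=
  ["doesn't make sense", "does not make sense", "this is incorrect",
   "this can't be right", "impossible", "let me reconsider", "wait, that's wrong"]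

def has_self_doubt_py (reasoning : String) : Bool :=
  let reasoningLower := PySem.Str.lower reasoning
  doubtPhrasesA.any (fun phrase => PySem.Str.isIn phrase reasoningLower)

-- ===== PORT B =====
def doubtPhrasesB : List (List Char) :=
  ["doesn't make sense".toList, "does not make sense".toList, "this is incorrect".toList,
   "this can't be right".toList, "impossible".toList, "let me reconsider".toList,
   "wait, that's wrong".toList]

-- _BY_FIRST.setdefault(p[0], []).append(p) over the phrase list; p.head?.getD ' ' ports p[0]
-- (exact: every phrase literal is nonempty)
def byFirstFold : List (List Char) → PySem.Dict Char (List (List Char)) → PySem.Dict Char (List (List Char))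
  | [], d => d
  | p :: ps, d => byFirstFold ps (d.insert (p.head?.getD ' ') (d.getD (p.head?.getD ' ') [] ++ [p]))

def byFirst : PySem.Dict Char (List (List Char)) := byFirstFold doubtPhrasesB PySem.Dict.empty

-- 'for i, ch in enumerate(text): for phrase in _BY_FIRST.get(ch, ()): if text.startswith(phrase, i)':
-- recursion on the suffix at position i; text.startswith(phrase, i) = phrase.isPrefixOf (suffix at i)
def scanFrom : List Char → Bool
  | [] => false
  | c :: rest => (byFirst.getD c []).any (fun p => p.isPrefixOf (c :: rest)) || scanFrom rest

def has_self_doubt_py_alt (reasoning : String) : Bool :=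
  scanFrom (PySem.Chars.lower reasoning.toList)

-- ===== PRECONDITION & SPEC =====
def Spec_has_self_doubt_py (reasoning : String) (out : Bool) : Prop := out = has_self_doubt_py_alt reasoning
instance (reasoning : String) (out : Bool) : Decidable (Spec_has_self_doubt_py reasoning out) := by unfold Spec_has_self_doubt_py; infer_instance

-- ===== CLAIM (what is proved, stated in full; the proofs are below) =====
def Claim_equal_has_self_doubt_py : Prop := ∀ (reasoning : String), Dom_has_self_doubt_py reasoning → Spec_has_self_doubt_py reasoning (has_self_doubt_py reasoning)

-- ===== LEMMAS AND PROOFS =====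

-- the dictionary built by byFirstFold indexes exactly the phrases by first character
theorem getD_byFirstFold (ps : List (List Char)) (d : PySem.Dict Char (List (List Char))) (c : Char) :
    (byFirstFold ps d).getD c [] = d.getD c [] ++ ps.filter (fun p => p.head?.getD ' ' == c) := by
  induction ps generalizing d with
  | nil => simp [byFirstFold]
  | cons p ps ih =>
    rw [byFirstFold, ih]
    rw [PySem.Dict.getD_insert]
    by_cases h : c = p.head?.getD ' '
    · simp [h]
    · have h' : ¬ p.head?.getD ' ' = c := fun hh => h hh.symm
      simp [h, h']

theorem byFirst_getD (c : Char) :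
    byFirst.getD c [] = doubtPhrasesB.filter (fun p => p.head?.getD ' ' == c) := by
  rw [byFirst, getD_byFirstFold]
  simp [PySem.Dict.empty, PySem.Dict.getD, PySem.Dict.get?]

theorem doubtPhrasesB_ne_nil : ∀ p ∈ doubtPhrasesB, p ≠ [] := by decide

-- the scan finds exactly the texts that contain some phrase as an infix
theorem scanFrom_iff (t : List Char) :
    scanFrom t = true ↔ ∃ p ∈ doubtPhrasesB, p <:+: t := by
  induction t with
  | nil =>
    simp only [scanFrom, Bool.false_eq_true, false_iff]
    rintro ⟨p, hp, hinf⟩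
    exact doubtPhrasesB_ne_nil p hp (List.eq_nil_of_infix_nil hinf)
  | cons c rest ih =>
    rw [scanFrom, Bool.or_eq_true, ih, List.any_eq_true]
    constructor
    · rintro (⟨p, hp, hpre⟩ | ⟨p, hp, hinf⟩)
      · rw [byFirst_getD, List.mem_filter] at hp
        exact ⟨p, hp.1, (List.isPrefixOf_iff_prefix.mp hpre).isInfix⟩
      · exact ⟨p, hp, List.infix_cons_iff.mpr (Or.inr hinf)⟩
    · rintro ⟨p, hp, hinf⟩
      rcases List.infix_cons_iff.mp hinf with hpre | hinf'
      · left
        refine ⟨p, ?_, List.isPrefixOf_iff_prefix.mpr hpre⟩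
        rw [byFirst_getD, List.mem_filter]
        refine ⟨hp, ?_⟩
        obtain ⟨x, xs, rfl⟩ := List.exists_cons_of_ne_nil (doubtPhrasesB_ne_nil p hp)
        obtain ⟨s, hs⟩ := hpre
        simp_all
      · exact Or.inr ⟨p, hp, hinf'⟩

-- ===== VERDICT (by name: the statement is the Claim_ definition above) =====
theorem has_self_doubt_py_spec : Claim_equal_has_self_doubt_py := by
  intro reasoning _
  unfold Spec_has_self_doubt_py has_self_doubt_py has_self_doubt_py_alt
  rw [Bool.eq_iff_iff, List.any_eq_true, scanFrom_iff]
  constructor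
  · rintro ⟨phrase, hmem, hIn⟩
    rw [PySem.Str.isIn_iff_infix, PySem.Str.toList_lower] at hIn
    refine ⟨phrase.toList, ?_, hIn⟩
    fin_cases hmem <;> simp [doubtPhrasesB]
  · have key : ∀ s : String, s.toList <:+: PySem.Chars.lower reasoning.toList →
        s ∈ doubtPhrasesA →
        ∃ phrase ∈ doubtPhrasesA, PySem.Str.isIn phrase (PySem.Str.lower reasoning) = true :=
      fun s hs hmem =>
        ⟨s, hmem, by rw [PySem.Str.isIn_iff_infix, PySem.Str.toList_lower]; exact hs⟩
    rintro ⟨p, hp, hinf⟩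
    fin_cases hp <;> exact key _ hinf (by simp [doubtPhrasesA])
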